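-- pv_equiv track=rewrite | github.com/WandererGuy/TarGuess-I-main | my_extract_method.py | final_group
-- ===== SOURCE A (Python) =====
-- def find_groups(password, text):
--     temp_strings = []
--     pass_list = []
--     last =  text[0]
--     last_index = 0
--     for i in range (len(text)):
--
--         if text[i] == last:
--             pass
--         # keep a temp last in task of continous string
--         else:
--             last = text[i]
--             temp = text[last_index:i]
--             temp_strings.append(temp)
--
--             temp_pass = password[last_index:i]
--             pass_list.append(temp_pass)
--             last_index = i
--
--         # build case for only last string
--         if i == len(text) - 1:
--             temp = text[last_index:]
--             temp_strings.append(temp)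
--
--             temp_pass = password[last_index:]
--             pass_list.append(temp_pass)
--     return pass_list, temp_strings
--
-- def shorten (text):
--     return text[0]+str(len(text))
--
-- def final_group(password, real_pattern):
--     pass_list, temp_strings = find_groups(password, real_pattern)
--     temp_ls = []
--     for i in range (len(temp_strings)):
--         for item in ['L','S','D']:
--             if item in temp_strings[i]:
--                 temp_ls.append(shorten(temp_strings[i]) + '\t' + pass_list[i])
--
--
--     return temp_ls
-- ===== SOURCE B (Python) =====
-- def final_group(password, real_pattern):
--     # Single pass over the runs of identical characters in real_pattern,
--     # keeping a running start index; each labelled run is emitted directly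
--     # with its matching password slice.
--     out = []
--     n = len(real_pattern)
--     i = 0
--     while i < n:
--         c = real_pattern[i]
--         j = i + 1
--         while j < n and real_pattern[j] == c:
--             j += 1
--         if c in 'LSD':
--             out.append(c + str(j - i) + '\t' + password[i:j])
--         i = j
--     return out
-- ===== Notes on version B (the rewrite author's own statement) =====
-- stated objective: faster
-- what changed: A builds two parallel lists (pattern runs and password slices) in one indexed loop and then re-scans them with a nested L/S/D loop; B makes a single pass over the runs of real_pattern with a running start index, emitting each labelled entry with the run's own password slice directly, with no intermediate lists and no second pass.
-- intended difference: When password is longer than real_pattern and real_pattern's last character is one of 'L','S','D', A's final entry carries password[start:], silently absorbing password's tail beyond the pattern's length, while B attaches exactly that run's slice password[start:start+L], the intended per-run slice. — e.g. on final_group("abcde", "LL"): A returns ["L2\tabcde"], B returns ["L2\tab"]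
import Mathlib
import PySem

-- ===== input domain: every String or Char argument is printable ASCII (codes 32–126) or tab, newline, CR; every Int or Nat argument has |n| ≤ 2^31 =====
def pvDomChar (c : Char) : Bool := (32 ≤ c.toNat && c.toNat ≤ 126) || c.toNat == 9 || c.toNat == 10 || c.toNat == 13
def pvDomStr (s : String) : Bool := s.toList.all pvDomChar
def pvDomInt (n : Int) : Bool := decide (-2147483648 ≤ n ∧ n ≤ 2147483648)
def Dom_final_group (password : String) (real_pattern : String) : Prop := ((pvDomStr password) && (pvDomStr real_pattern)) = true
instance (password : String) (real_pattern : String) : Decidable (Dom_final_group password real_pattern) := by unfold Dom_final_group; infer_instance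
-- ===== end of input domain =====

-- B replaces A's two-pass scheme (build run/password-slice lists, then re-scan them with an
-- inner L/S/D loop) by a single pass over the runs of the pattern that emits each labelled
-- entry directly; on runs past the end of the pattern see D_ below (B slices per run).

-- ===== PORT A =====
-- A-side helper: split text into maximal runs and password into the matching slices
def find_groups (password : String) (text : String) : List String × List String :=
  let tl := text.toList
  let pl := password.toList
  let n : Int := tl.length
  let fin :=
    (PySem.List.pyRange 0 n).foldl
      (fun (st : List String × List String × Char × Int) i =>
        let st1 : List String × List String × Char × Int :=
          if PySem.List.pyGetD tl i ' ' = st.2.2.1 then st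
          else (st.1 ++ [String.ofList (PySem.List.slice tl (some st.2.2.2) (some i))],
                st.2.1 ++ [String.ofList (PySem.List.slice pl (some st.2.2.2) (some i))],
                PySem.List.pyGetD tl i ' ', i)
        if i = n - 1 then
          (st1.1 ++ [String.ofList (PySem.List.slice tl (some st1.2.2.2) none)],
           st1.2.1 ++ [String.ofList (PySem.List.slice pl (some st1.2.2.2) none)],
           st1.2.2.1, st1.2.2.2)
        else st1)
      ([], [], PySem.List.pyGetD tl 0 ' ', 0)
  (fin.2.1, fin.1)

-- A-side helper: shorten(text) = text[0] + str(len(text)), built at the character level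
def shorten (text : String) : String :=
  String.ofList (PySem.List.pyGetD text.toList 0 ' ' :: PySem.Int.toChars (PySem.Str.len text))

def final_group (password : String) (real_pattern : String) : List String :=
  let g := find_groups password real_pattern
  let pass_list := g.1
  let temp_strings := g.2
  (PySem.List.pyRange 0 (temp_strings.length : Int)).foldl
    (fun acc i =>
      (['L', 'S', 'D']).foldl
        (fun acc2 item =>
          if PySem.Str.isIn (String.ofList [item])
              (PySem.List.pyGetD temp_strings i (String.ofList [])) = true then
            acc2 ++ [String.ofList
              ((shorten (PySem.List.pyGetD temp_strings i (String.ofList []))).toList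
                ++ '\t' :: (PySem.List.pyGetD pass_list i (String.ofList [])).toList)]
          else acc2)
        acc)
    []

-- ===== PORT B =====
-- one pass over the runs of real_pattern, with a running start index i into both strings;
-- password[i:j] for 0 ≤ i ≤ j is exactly (drop i).take (j - i)
def final_group_alt_go (pw : List Char) (pat : List Char) : Nat → Nat → List String
  | 0, _ => []
  | fuel + 1, i =>
    if i < pat.length then
      let c := pat.getD i ' '
      let j := i + 1 + ((pat.drop (i + 1)).takeWhile (fun x => x = c)).length
      let entry :=
        if c = 'L' ∨ c = 'S' ∨ c = 'D' then
          [String.ofList (c :: PySem.Int.toChars ((j - i : Nat) : Int) ++ '\t' :: (pw.drop i).take (j - i))]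
        else []
      entry ++ final_group_alt_go pw pat fuel j
    else []

def final_group_alt (password : String) (real_pattern : String) : List String :=
  final_group_alt_go password.toList real_pattern.toList real_pattern.toList.length 0

-- ===== PRECONDITION & SPEC =====
-- A evaluates real_pattern[0] unconditionally, so it raises IndexError on an empty
-- real_pattern; Pre_ excludes exactly that input.
def Pre_final_group (password : String) (real_pattern : String) : Prop := real_pattern ≠ ""
instance (password : String) (real_pattern : String) : Decidable (Pre_final_group password real_pattern) := by unfold Pre_final_group; infer_instance

def pvWitness_final_group : String × String := ("abc12", "LLLDD")

-- When password is longer than real_pattern and real_pattern's last character is one of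
-- 'L','S','D', A's final entry carries password[start:], silently absorbing password's tail
-- beyond the pattern's length, while B attaches exactly that run's slice
-- password[start:start+L], the intended per-run slice.
def D_final_group (password : String) (real_pattern : String) : Prop :=
  real_pattern ≠ "" ∧ real_pattern.toList.length < password.toList.length ∧
    (real_pattern.toList.getLast? = some 'L' ∨ real_pattern.toList.getLast? = some 'S' ∨
     real_pattern.toList.getLast? = some 'D')
instance (password : String) (real_pattern : String) : Decidable (D_final_group password real_pattern) := by unfold D_final_group; infer_instance

def Spec_final_group (password : String) (real_pattern : String) (out : List String) : Prop := ¬ D_final_group password real_pattern → out = final_group_alt password real_pattern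
instance (password : String) (real_pattern : String) (out : List String) : Decidable (Spec_final_group password real_pattern out) := by unfold Spec_final_group; infer_instance

def pvDiffWitness_final_group : String × String := ("abcde", "LL")
def pvDiffWitnessOut_final_group : (List String) × (List String) := (["L2\tabcde"], ["L2\tab"])

-- ===== CLAIM (what is proved, stated in full; the proofs are below) =====
def Claim_unchanged_final_group : Prop := ∀ (password : String) (real_pattern : String), Dom_final_group password real_pattern → Pre_final_group password real_pattern → Spec_final_group password real_pattern (final_group password real_pattern)
def Claim_changed_final_group : Prop := Dom_final_group (pvDiffWitness_final_group.1) (pvDiffWitness_final_group.2) ∧ Pre_final_group (pvDiffWitness_final_group.1) (pvDiffWitness_final_group.2) ∧ D_final_group (pvDiffWitness_final_group.1) (pvDiffWitness_final_group.2) ∧ final_group (pvDiffWitness_final_group.1) (pvDiffWitness_final_group.2) = pvDiffWitnessOut_final_group.1 ∧ final_group_alt (pvDiffWitness_final_group.1) (pvDiffWitness_final_group.2) = pvDiffWitnessOut_final_group.2 ∧ pvDiffWitnessOut_final_group.1 ≠ pvDiffWitnessOut_final_group.2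
def Claim_exact_final_group : Prop := ∀ (password : String) (real_pattern : String), Dom_final_group password real_pattern → Pre_final_group password real_pattern → D_final_group password real_pattern → final_group password real_pattern ≠ final_group_alt password real_pattern

-- ===== LEMMAS AND PROOFS =====

def groupsSpec (pw : List Char) (pat : List Char) : List String × List String :=
  match pat with
  | [] => ([], [])
  | c :: tlp =>
    let L := 1 + (tlp.takeWhile (fun x => x = c)).length
    let rest := (c :: tlp).drop L
    if rest.isEmpty then ([String.ofList pw], [String.ofList (c :: tlp)])
    else
      ((String.ofList (pw.take L)) :: (groupsSpec (pw.drop L) rest).1,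
       (String.ofList ((c :: tlp).take L)) :: (groupsSpec (pw.drop L) rest).2)
termination_by pat.length
decreasing_by simp

-- proof-side restatement of A's composite, consuming the rests of both strings
def runsGo (rest_pw : List Char) (rest_pat : List Char) : List String :=
  match rest_pat with
  | [] => []
  | c :: tlp =>
    let L := 1 + (tlp.takeWhile (fun x => x = c)).length
    let rest2 := (c :: tlp).drop L
    let chunk := if rest2.isEmpty then rest_pw else rest_pw.take L
    let entry :=
      if c = 'L' ∨ c = 'S' ∨ c = 'D' then
        [String.ofList (c :: PySem.Int.toChars (L : Int) ++ '\t' :: chunk)]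
      else []
    entry ++ runsGo (rest_pw.drop L) rest2
termination_by rest_pat.length
decreasing_by simp

-- proof-side restatement of B's pass
def runsGoB (rest_pw : List Char) (rest_pat : List Char) : List String :=
  match rest_pat with
  | [] => []
  | c :: tlp =>
    let L := 1 + (tlp.takeWhile (fun x => x = c)).length
    let entry :=
      if c = 'L' ∨ c = 'S' ∨ c = 'D' then
        [String.ofList (c :: PySem.Int.toChars (L : Int) ++ '\t' :: rest_pw.take L)]
      else []
    entry ++ runsGoB (rest_pw.drop L) ((c :: tlp).drop L)
termination_by rest_pat.length
decreasing_by simp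

lemma groupsSpec_uniform (pw l : List Char) (c : Char) (hne : l ≠ [])
    (hall : ∀ x ∈ l, x = c) :
    groupsSpec pw l = ([String.ofList pw], [String.ofList l]) := by
  cases l with
  | nil => simp at hne
  | cons a as =>
    have ha : a = c := hall a (by simp)
    have htw : as.takeWhile (fun x => x = a) = as := by
      apply List.takeWhile_eq_self_iff.mpr ?_
      intro x hx
      simp [ha, hall x (by simp [hx])]
    rw [groupsSpec]
    simp [htw]

lemma groupsSpec_len : ∀ (pw pat : List Char),
    (groupsSpec pw pat).1.length = (groupsSpec pw pat).2.length := by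
  intro pw pat
  induction pw, pat using groupsSpec.induct with
  | case1 => simp [groupsSpec]
  | case2 pw c tlp L rest hr =>
    have hr' : List.drop (1 + (List.takeWhile (fun x => decide (x = c)) tlp).length) (c :: tlp) = [] := by
      exact List.isEmpty_iff.mp hr
    rw [groupsSpec]; simp only [List.isEmpty_iff]; rw [if_pos hr']; rfl
  | case3 pw c tlp L rest hr ih =>
    have hr' : ¬ List.drop (1 + (List.takeWhile (fun x => decide (x = c)) tlp).length) (c :: tlp) = [] := by
      exact fun h => hr (List.isEmpty_iff.mpr h)
    rw [groupsSpec]; simp only [List.isEmpty_iff]; rw [if_neg hr']; simpa using ih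

lemma entry_eq (c : Char) (tw pwc : List Char) (hall : ∀ x ∈ tw, x = c) :
    ((['L','S','D']).filter (fun item => PySem.Str.isIn (String.ofList [item]) (String.ofList (c::tw)))).map
       (fun _ => String.ofList ((shorten (String.ofList (c::tw))).toList ++ '\t' :: pwc))
    = if c = 'L' ∨ c = 'S' ∨ c = 'D' then
        [String.ofList (c :: PySem.Int.toChars ((1 + tw.length : Nat) : Int) ++ '\t' :: pwc)]
      else [] := by
  have hb : ∀ x : Char, PySem.Str.isIn (String.ofList [x]) (String.ofList (c::tw)) = decide (x = c) := by
    intro x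
    have hiff : PySem.Chars.isIn [x] (c::tw) = true ↔ x = c := by
      rw [PySem.Chars.isIn_iff_infix, List.singleton_infix_iff]
      constructor
      · intro hx
        rcases List.mem_cons.mp hx with rfl | hx
        · rfl
        · exact hall _ hx
      · rintro rfl; exact List.mem_cons_self ..
    have hstr : PySem.Str.isIn (String.ofList [x]) (String.ofList (c::tw)) = PySem.Chars.isIn [x] (c::tw) := by
      simp [pysem]
    rw [hstr]
    by_cases h : x = c
    · subst h; simp only [decide_true]; exact hiff.mpr rfl
    · simp only [h, decide_false]
      exact Bool.eq_false_iff.mpr (fun hc => h (hiff.mp hc))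
  have hsh : (shorten (String.ofList (c::tw))).toList = c :: PySem.Int.toChars ((1 + tw.length : Nat) : Int) := by
    simp [shorten, PySem.List.pyGetD_zero_cons, PySem.Str.len_eq]
    congr 1
    omega
  rw [hsh]
  by_cases h1 : c = 'L'
  · subst h1; simp only [List.filter_cons, List.filter_nil, hb]; simp
  · by_cases h2 : c = 'S'
    · subst h2; simp only [List.filter_cons, List.filter_nil, hb]; simp
    · by_cases h3 : c = 'D'
      · subst h3; simp only [List.filter_cons, List.filter_nil, hb]; simp
      · simp only [List.filter_cons, List.filter_nil, hb]
        simp [h1, h2, h3, Ne.symm h1, Ne.symm h2, Ne.symm h3]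

lemma take_len_takeWhile (p : Char → Bool) (l : List Char) :
    l.take (l.takeWhile p).length = l.takeWhile p := by
  obtain ⟨r, hr⟩ := List.takeWhile_prefix p (l := l)
  set tw := l.takeWhile p with htw
  rw [← hr]
  exact List.take_left

lemma take_takeWhile_cons (c : Char) (tlp : List Char) :
    (c :: tlp).take (1 + (tlp.takeWhile (fun x => x = c)).length) = c :: tlp.takeWhile (fun x => x = c) := by
  have h : (1 + (tlp.takeWhile (fun x => x = c)).length) = (tlp.takeWhile (fun x => x = c)).length + 1 := by omega
  rw [h, List.take_succ_cons, take_len_takeWhile]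

lemma flatMap_spec_eq_alt : ∀ (pw pat : List Char),
    ((groupsSpec pw pat).2.zip (groupsSpec pw pat).1).flatMap (fun tp =>
      ((['L','S','D']).filter (fun item => PySem.Str.isIn (String.ofList [item]) tp.1)).map
        (fun _ => String.ofList ((shorten tp.1).toList ++ '\t' :: tp.2.toList))) =
    runsGo pw pat := by
  intro pw pat
  induction pw, pat using groupsSpec.induct with
  | case1 => simp [groupsSpec, runsGo]
  | case2 pw c tlp L rest hr =>
    have hr' : List.drop (1 + (List.takeWhile (fun x => decide (x = c)) tlp).length) (c :: tlp) = [] :=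
      List.isEmpty_iff.mp hr
    have htw : tlp.takeWhile (fun x => decide (x = c)) = tlp := by
      have hle : tlp.length ≤ (tlp.takeWhile (fun x => decide (x = c))).length := by
        have := congrArg List.length hr'
        simp at this
        omega
      exact (List.takeWhile_prefix _).eq_of_length_le hle
    have hall : ∀ x ∈ tlp, x = c := by
      intro x hx
      have hx' : x ∈ tlp.takeWhile (fun x => decide (x = c)) := by rw [htw]; exact hx
      simpa using List.mem_takeWhile_imp hx'
    rw [groupsSpec]
    simp only [List.isEmpty_iff]
    rw [if_pos hr']
    rw [runsGo]
    simp only [List.isEmpty_iff]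
    rw [if_pos hr', hr']
    rw [runsGo]
    simp only [List.append_nil, List.zip_cons_cons, List.zip_nil_right, List.flatMap_cons,
      List.flatMap_nil, List.append_nil, String.toList_ofList]
    rw [entry_eq c tlp pw hall, htw]
  | case3 pw c tlp L rest hr ih =>
    have hr' : ¬ List.drop (1 + (List.takeWhile (fun x => decide (x = c)) tlp).length) (c :: tlp) = [] :=
      fun h => hr (List.isEmpty_iff.mpr h)
    have hall : ∀ x ∈ tlp.takeWhile (fun x => decide (x = c)), x = c := by
      intro x hx
      simpa using List.mem_takeWhile_imp hx
    rw [groupsSpec]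
    simp only [List.isEmpty_iff]
    rw [if_neg hr']
    rw [runsGo]
    simp only [List.isEmpty_iff]
    rw [if_neg hr']
    simp only [List.zip_cons_cons, List.flatMap_cons, String.toList_ofList]
    rw [take_takeWhile_cons, entry_eq c (tlp.takeWhile (fun x => decide (x = c))) (pw.take _) hall]
    rw [ih]

lemma secondLoop_gen : ∀ (ts ps : List String), ps.length = ts.length → ∀ acc,
    (PySem.List.pyRange 0 (ts.length : Int)).foldl
      (fun acc i =>
        (['L', 'S', 'D']).foldl
          (fun acc2 item =>
            if PySem.Str.isIn (String.ofList [item])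
                (PySem.List.pyGetD ts i (String.ofList [])) = true then
              acc2 ++ [String.ofList
                ((shorten (PySem.List.pyGetD ts i (String.ofList []))).toList
                  ++ '\t' :: (PySem.List.pyGetD ps i (String.ofList [])).toList)]
            else acc2)
          acc)
      acc =
    acc ++ (ts.zip ps).flatMap (fun tp =>
      ((['L', 'S', 'D']).filter (fun item => PySem.Str.isIn (String.ofList [item]) tp.1)).map
        (fun _ => String.ofList ((shorten tp.1).toList ++ '\t' :: tp.2.toList))) := by
  intro ts
  induction ts using List.reverseRecOn with
  | nil =>
    intro ps hlen acc
    simp [show PySem.List.pyRange 0 0 = [] from rfl]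
  | append_singleton ts t ih =>
    intro ps hlen acc
    cases ps using List.reverseRecOn with
    | nil => simp at hlen
    | append_singleton ps p =>
      have hlen' : ps.length = ts.length := by simpa using hlen
      have hcast : ((ts ++ [t]).length : Int) = (ts.length : Int) + 1 := by simp
      rw [hcast, PySem.List.pyRange_one_succ_right (by positivity), List.foldl_append]
      have hcongr : (PySem.List.pyRange 0 (ts.length : Int)).foldl
          (fun acc i =>
            (['L', 'S', 'D']).foldl
              (fun acc2 item =>
                if PySem.Str.isIn (String.ofList [item])
                    (PySem.List.pyGetD (ts ++ [t]) i (String.ofList [])) = true then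
                  acc2 ++ [String.ofList
                    ((shorten (PySem.List.pyGetD (ts ++ [t]) i (String.ofList []))).toList
                      ++ '\t' :: (PySem.List.pyGetD (ps ++ [p]) i (String.ofList [])).toList)]
                else acc2)
              acc)
          acc =
          (PySem.List.pyRange 0 (ts.length : Int)).foldl
          (fun acc i =>
            (['L', 'S', 'D']).foldl
              (fun acc2 item =>
                if PySem.Str.isIn (String.ofList [item])
                    (PySem.List.pyGetD ts i (String.ofList [])) = true then
                  acc2 ++ [String.ofList
                    ((shorten (PySem.List.pyGetD ts i (String.ofList []))).toList
                      ++ '\t' :: (PySem.List.pyGetD ps i (String.ofList [])).toList)]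
                else acc2)
              acc)
          acc := by
        apply PySem.List.foldl_congr_mem
        intro a x hx
        have hx' := (PySem.List.mem_pyRange_one.mp hx)
        have h0 : 0 ≤ x := hx'.1
        have h1 : x < ts.length := by exact_mod_cast hx'.2
        have hts : PySem.List.pyGetD (ts ++ [t]) x (String.ofList []) =
            PySem.List.pyGetD ts x (String.ofList []) := by
          rw [PySem.List.pyGetD_eq_getElem _ _ h0 (by simp; omega),
              PySem.List.pyGetD_eq_getElem _ _ h0 (by omega)]
          exact List.getElem_append_left (by omega)
        have hps : PySem.List.pyGetD (ps ++ [p]) x (String.ofList []) =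
            PySem.List.pyGetD ps x (String.ofList []) := by
          rw [PySem.List.pyGetD_eq_getElem _ _ h0 (by simp; omega),
              PySem.List.pyGetD_eq_getElem _ _ h0 (by rw [hlen']; omega)]
          exact List.getElem_append_left (by rw [hlen']; omega)
        rw [hts, hps]
      rw [hcongr, ih ps hlen' acc]
      simp only [List.foldl_cons, List.foldl_nil]
      have hgt : PySem.List.pyGetD (ts ++ [t]) (ts.length : Int) (String.ofList []) = t := by
        rw [PySem.List.pyGetD_eq_getElem _ _ (by positivity) (by simp)]
        simp
      have hgp : PySem.List.pyGetD (ps ++ [p]) (ts.length : Int) (String.ofList []) = p := by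
        rw [PySem.List.pyGetD_eq_getElem _ _ (by positivity) (by simp [hlen'])]
        simp [← hlen']
      rw [hgt, hgp, List.zip_append (by omega), List.flatMap_append]
      have hbr : ∀ x : Char, PySem.Str.isIn (String.ofList [x]) t = PySem.Chars.isIn [x] t.toList := by
        intro x; simp [pysem]
      simp only [hbr]
      split_ifs <;>
        · simp only [List.filter_cons, List.filter_nil, *]
          simp [*, List.replicate]

lemma takeWhile_len_eq (c : Char) : ∀ (m : Nat) (l : List Char), m ≤ l.length →
    (∀ j, j < m → l.getD j ' ' = c) → (m < l.length → l.getD m ' ' ≠ c) →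
    (l.takeWhile (fun x => x = c)).length = m := by
  intro m
  induction m with
  | zero =>
    intro l hm h1 h2
    cases l with
    | nil => simp
    | cons a as =>
      have := h2 (by simp)
      simp [List.getD] at this
      simp [List.takeWhile, this]
  | succ m ih =>
    intro l hm h1 h2
    cases l with
    | nil => simp at hm
    | cons a as =>
      have ha : a = c := by have := h1 0 (by omega); simpa [List.getD] using this
      have : (as.takeWhile (fun x => x = c)).length = m := by
        apply ih as (by simpa using hm)
        · intro j hj; have := h1 (j+1) (by omega); simpa [List.getD] using this
        · intro hlt; have := h2 (by simpa using hlt); simpa [List.getD] using this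
      simp [List.takeWhile, ha, this]

lemma getD_drop (l : List Char) (s j : Nat) : (l.drop s).getD j ' ' = l.getD (s + j) ' ' := by
  simp [List.getD, List.getElem?_drop]

lemma pyRange_nil (a : Int) : PySem.List.pyRange a a = [] := by
  refine List.eq_nil_iff_forall_not_mem.mpr (fun x hx => ?_)
  have := PySem.List.mem_pyRange_one.mp hx
  omega

lemma all_getD_to_mem (tl : List Char) (li : Nat) (c : Char)
    (h : ∀ j, li ≤ j → j < tl.length → tl.getD j ' ' = c) :
    ∀ x ∈ tl.drop li, x = c := by
  intro x hx
  obtain ⟨j, hj, hxe⟩ := List.mem_iff_getElem.mp hx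
  have hlen : li + j < tl.length := by
    have := hj
    simp [List.length_drop] at this
    omega
  have : (tl.drop li)[j] = tl[li + j] := by
    rw [List.getElem_drop]
  rw [this] at hxe
  have hg := h (li + j) (by omega) hlen
  rw [List.getD_eq_getElem _ _ hlen] at hg
  exact hxe ▸ hg

lemma spec_flush (tl : List Char) (pw : List Char) (li k : Nat) (c : Char)
    (hlik : li < k) (hk : k < tl.length)
    (hrun : ∀ j, li ≤ j → j < k → tl.getD j ' ' = c)
    (hstop : tl.getD k ' ' ≠ c) :
    groupsSpec pw (tl.drop li) =
      (String.ofList (pw.take (k - li)) :: (groupsSpec (pw.drop (k - li)) (tl.drop k)).1,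
       String.ofList ((tl.drop li).take (k - li)) :: (groupsSpec (pw.drop (k - li)) (tl.drop k)).2) := by
  have hli : li < tl.length := by omega
  have hdc : tl.drop li = c :: tl.drop (li + 1) := by
    have h1 : tl[li] :: tl.drop (li + 1) = tl.drop li := List.getElem_cons_drop ..
    have h2 : tl[li] = c := by
      have := hrun li (le_refl _) hlik
      rwa [List.getD_eq_getElem _ _ hli] at this
    rw [← h1, h2]
  have htwl : ((tl.drop (li + 1)).takeWhile (fun x => x = c)).length = k - li - 1 := by
    apply takeWhile_len_eq c (k - li - 1) (tl.drop (li + 1)) (by simp [List.length_drop]; omega)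
    · intro j hj
      rw [getD_drop]
      exact hrun (li + 1 + j) (by omega) (by omega)
    · intro hlt
      rw [getD_drop]
      have hik : li + 1 + (k - li - 1) = k := by omega
      rw [hik]
      exact hstop
  have harith : 1 + (k - li - 1) = k - li := by omega
  have hrest : (c :: tl.drop (li + 1)).drop (k - li) = tl.drop k := by
    have : (tl.drop li).drop (k - li) = tl.drop k := by
      rw [List.drop_drop]
      congr 1
      omega
    rw [← hdc, this]
  have hrestne : tl.drop k ≠ [] := by
    simp [List.drop_eq_nil_iff]
    omega
  rw [hdc, groupsSpec]
  simp only [List.isEmpty_iff, htwl, harith, hrest]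
  rw [if_neg hrestne, ← hdc]

lemma loopG (pl tl : List Char) : ∀ (m k li : Nat) (c : Char) (ts ps : List String),
    k + m = tl.length → li ≤ k → k < tl.length →
    tl.getD li ' ' = c →
    (∀ j, li ≤ j → j < k → tl.getD j ' ' = c) →
    (((PySem.List.pyRange (k : Int) ((tl.length : Nat) : Int)).foldl
        (fun (st : List String × List String × Char × Int) i =>
          let st1 : List String × List String × Char × Int :=
            if PySem.List.pyGetD tl i ' ' = st.2.2.1 then st
            else (st.1 ++ [String.ofList (PySem.List.slice tl (some st.2.2.2) (some i))],
                  st.2.1 ++ [String.ofList (PySem.List.slice pl (some st.2.2.2) (some i))],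
                  PySem.List.pyGetD tl i ' ', i)
          if i = ((tl.length : Nat) : Int) - 1 then
            (st1.1 ++ [String.ofList (PySem.List.slice tl (some st1.2.2.2) none)],
             st1.2.1 ++ [String.ofList (PySem.List.slice pl (some st1.2.2.2) none)],
             st1.2.2.1, st1.2.2.2)
          else st1)
        (ts, ps, c, (li : Int))).1
      = ts ++ (groupsSpec (pl.drop li) (tl.drop li)).2 ∧
     ((PySem.List.pyRange (k : Int) ((tl.length : Nat) : Int)).foldl
        (fun (st : List String × List String × Char × Int) i =>
          let st1 : List String × List String × Char × Int :=
            if PySem.List.pyGetD tl i ' ' = st.2.2.1 then st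
            else (st.1 ++ [String.ofList (PySem.List.slice tl (some st.2.2.2) (some i))],
                  st.2.1 ++ [String.ofList (PySem.List.slice pl (some st.2.2.2) (some i))],
                  PySem.List.pyGetD tl i ' ', i)
          if i = ((tl.length : Nat) : Int) - 1 then
            (st1.1 ++ [String.ofList (PySem.List.slice tl (some st1.2.2.2) none)],
             st1.2.1 ++ [String.ofList (PySem.List.slice pl (some st1.2.2.2) none)],
             st1.2.2.1, st1.2.2.2)
          else st1)
        (ts, ps, c, (li : Int))).2.1
      = ps ++ (groupsSpec (pl.drop li) (tl.drop li)).1) := by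
  intro m
  induction m with
  | zero =>
    intro k li c ts ps hm hlik hk hli hrun
    omega
  | succ m ih =>
    intro k li c ts ps hm hlik hk hli hrun
    rw [PySem.List.pyRange_one_cons (by exact_mod_cast hk), List.foldl_cons]
    have hget : PySem.List.pyGetD tl ((k : Nat) : Int) ' ' = tl.getD k ' ' := by simp
    have hdropli : tl.drop li ≠ [] := by simp [List.drop_eq_nil_iff]; omega
    dsimp only
    rw [hget]
    by_cases hck : tl.getD k ' ' = c
    · rw [if_pos hck]
      by_cases hlast : k + 1 = tl.length
      · rw [if_pos (by omega)]
        rw [show ((k : Int) + 1) = ((tl.length : Nat) : Int) by omega,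
            pyRange_nil, List.foldl_nil]
        have hall : ∀ x ∈ tl.drop li, x = c := by
          apply all_getD_to_mem
          intro j hj1 hj2
          rcases Nat.lt_or_ge j k with h | h
          · exact hrun j hj1 h
          · have : j = k := by omega
            rw [this]; exact hck
        rw [groupsSpec_uniform _ _ c hdropli hall]
        rw [PySem.List.slice_from_natCast, PySem.List.slice_from_natCast]
        exact ⟨rfl, rfl⟩
      · rw [if_neg (by omega)]
        rw [show ((k : Int) + 1) = (((k + 1 : Nat) : Nat) : Int) by push_cast; ring]
        exact ih (k+1) li c ts ps (by omega) (by omega) (by omega) hli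
          (fun j hj1 hj2 => by
            rcases Nat.lt_or_ge j k with h | h
            · exact hrun j hj1 h
            · have : j = k := by omega
              rw [this]; exact hck)
    · rw [if_neg hck]
      have hlik' : li < k := by
        rcases Nat.lt_or_ge li k with h | h
        · exact h
        · exfalso; have : li = k := by omega
          rw [this] at hli; exact hck hli
      have hflush := spec_flush tl (pl.drop li) li k c hlik' hk hrun hck
      have hdd : (pl.drop li).drop (k - li) = pl.drop k := by
        rw [List.drop_drop]; congr 1; omega
      rw [hdd] at hflush
      rw [PySem.List.slice_natCast, PySem.List.slice_natCast]
      by_cases hlast : k + 1 = tl.length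
      · rw [if_pos (by omega)]
        rw [show ((k : Int) + 1) = ((tl.length : Nat) : Int) by omega,
            pyRange_nil, List.foldl_nil]
        have hdropk : tl.drop k ≠ [] := by simp [List.drop_eq_nil_iff]; omega
        have hallk : ∀ x ∈ tl.drop k, x = tl.getD k ' ' := by
          apply all_getD_to_mem
          intro j hj1 hj2
          have : j = k := by omega
          rw [this]
        rw [hflush, groupsSpec_uniform _ _ _ hdropk hallk]
        rw [PySem.List.slice_from_natCast, PySem.List.slice_from_natCast]
        constructor <;> simp
      · rw [if_neg (by omega)]
        rw [show ((k : Int) + 1) = (((k + 1 : Nat) : Nat) : Int) by push_cast; ring]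
        have hstep : ∀ j, k ≤ j → j < k + 1 → tl.getD j ' ' = tl.getD k ' ' := by
          intro j h1 h2
          have hjk : j = k := by omega
          subst hjk
          rfl
        have := ih (k+1) k (tl.getD k ' ')
          (ts ++ [String.ofList (List.take (k - li) (List.drop li tl))])
          (ps ++ [String.ofList (List.take (k - li) (List.drop li pl))])
          (by omega) (by omega) (by omega) rfl hstep
        rw [this.1, this.2, hflush]
        constructor <;> simp

lemma toList_ne_nil (text : String) (h : text ≠ "") : text.toList ≠ [] := by
  intro hh
  apply h
  have := congrArg String.ofList hh
  simpa using this

lemma runsGo_nil (pw : List Char) : runsGo pw [] = [] := by rw [runsGo]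

lemma runsGoB_nil (pw : List Char) : runsGoB pw [] = [] := by rw [runsGoB]

lemma alt_go_eq (pw pat : List Char) :
    ∀ (m i : Nat), pat.length - i ≤ m →
      final_group_alt_go pw pat m i = runsGoB (pw.drop i) (pat.drop i) := by
  intro m
  induction m with
  | zero =>
    intro i hle
    have hge : pat.length ≤ i := by omega
    rw [final_group_alt_go]
    rw [show pat.drop i = [] from List.drop_eq_nil_iff.mpr hge, runsGoB_nil]
  | succ m ihm =>
    intro i hle
    by_cases h : i < pat.length
    · rw [final_group_alt_go, if_pos h]
      have hdc : pat.drop i = pat.getD i ' ' :: pat.drop (i + 1) := by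
        have h1 : pat[i] :: pat.drop (i + 1) = pat.drop i := List.getElem_cons_drop ..
        rw [← h1, List.getD_eq_getElem _ _ h]
      set c := pat.getD i ' ' with hc
      set tlen := ((pat.drop (i + 1)).takeWhile (fun x => x = c)).length with htlen
      have htlen_le : tlen ≤ pat.length - (i + 1) := by
        have := (List.takeWhile_prefix (l := pat.drop (i + 1)) (fun x => x = c)).length_le
        simp [List.length_drop] at this
        omega
      have hdd : (pat.drop i).drop (1 + tlen) = pat.drop (i + 1 + tlen) := by
        rw [List.drop_drop]; congr 1; omega
      have hrec : (pw.drop i).drop (1 + tlen) = pw.drop (i + 1 + tlen) := by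
        rw [List.drop_drop]; congr 1; omega
      rw [hdc, runsGoB]
      simp only [← hdc]
      have hji : i + 1 + tlen - i = 1 + tlen := by omega
      rw [hji]
      have htail := ihm (i + 1 + tlen) (by omega)
      rw [htail]
      rw [← htlen, hrec, hdd]
    · rw [final_group_alt_go, if_neg h]
      rw [show pat.drop i = [] from List.drop_eq_nil_iff.mpr (by omega), runsGoB_nil]

lemma find_groups_eq (password text : String) (h : text ≠ "") :
    find_groups password text =
      ((groupsSpec password.toList text.toList).1, (groupsSpec password.toList text.toList).2) := by
  have hne : text.toList ≠ [] := toList_ne_nil text h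
  have hlen : 0 < text.toList.length := List.length_pos_iff.mpr hne
  unfold find_groups
  dsimp only
  have h0 : PySem.List.pyGetD text.toList 0 ' ' = text.toList.getD 0 ' ' :=
    PySem.List.pyGetD_zero _ _
  have hG := loopG password.toList text.toList text.toList.length 0 0
    (text.toList.getD 0 ' ') [] [] (by omega) (le_refl _) hlen rfl
    (fun j h1 h2 => absurd h2 (by omega))
  simp only [Nat.cast_zero, List.drop_zero, List.nil_append] at hG
  rw [h0]
  exact Prod.ext_iff.mpr ⟨hG.2, hG.1⟩

lemma A_eq_runsGo (password real_pattern : String) (h : real_pattern ≠ "") :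
    final_group password real_pattern = runsGo password.toList real_pattern.toList := by
  unfold final_group
  dsimp only
  rw [find_groups_eq password real_pattern h]
  rw [secondLoop_gen (groupsSpec password.toList real_pattern.toList).2
        (groupsSpec password.toList real_pattern.toList).1
        (groupsSpec_len _ _) []]
  rw [List.nil_append, flatMap_spec_eq_alt]

lemma B_eq_runsGoB (password real_pattern : String) :
    final_group_alt password real_pattern = runsGoB password.toList real_pattern.toList := by
  unfold final_group_alt
  rw [alt_go_eq password.toList real_pattern.toList real_pattern.toList.length 0 (by omega)]
  simp

lemma uniform_getLast : ∀ (l : List Char) (c : Char), (∀ x ∈ l, x = c) →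
    (c :: l).getLast? = some c := by
  intro l
  induction l with
  | nil => intro c _; rfl
  | cons a as ih =>
    intro c hall
    have ha : a = c := hall a (by simp)
    rw [List.getLast?_cons_cons, ha]
    exact ih c (fun x hx => hall x (by simp [hx]))

lemma getLast_drop_of_ne_nil (l : List Char) (n : Nat) (h : l.drop n ≠ []) :
    (l.drop n).getLast? = l.getLast? := by
  conv_rhs => rw [← List.take_append_drop n l]
  rw [List.getLast?_append_of_ne_nil _ h]

lemma run_all_eq (c : Char) (tlp : List Char)
    (hr' : List.drop (1 + (List.takeWhile (fun x => decide (x = c)) tlp).length) (c :: tlp) = []) :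
    tlp.takeWhile (fun x => decide (x = c)) = tlp ∧ ∀ x ∈ tlp, x = c := by
  have htw : tlp.takeWhile (fun x => decide (x = c)) = tlp := by
    have hle : tlp.length ≤ (tlp.takeWhile (fun x => decide (x = c))).length := by
      have := congrArg List.length hr'
      simp at this
      omega
    exact (List.takeWhile_prefix _).eq_of_length_le hle
  refine ⟨htw, fun x hx => ?_⟩
  have hx' : x ∈ tlp.takeWhile (fun x => decide (x = c)) := by rw [htw]; exact hx
  simpa using List.mem_takeWhile_imp hx'

lemma runsGo_eq_runsGoB : ∀ (pw pat : List Char),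
    (pw.length ≤ pat.length ∨
      ¬ (pat.getLast? = some 'L' ∨ pat.getLast? = some 'S' ∨ pat.getLast? = some 'D')) →
    runsGo pw pat = runsGoB pw pat := by
  intro pw pat
  induction pw, pat using runsGo.induct with
  | case1 pw => intro _; rw [runsGo, runsGoB]
  | case2 pw c tlp L rest2 ih =>
    intro h
    rw [runsGo, runsGoB]
    by_cases hre : List.drop (1 + (List.takeWhile (fun x => decide (x = c)) tlp).length) (c :: tlp) = []
    · obtain ⟨htw, hall⟩ := run_all_eq c tlp hre
      simp only [List.isEmpty_iff]
      rw [if_pos hre, hre, runsGo_nil, runsGoB_nil]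
      rcases h with hlen | hlsd
      · have hlen' : pw.length ≤ 1 + (tlp.takeWhile (fun x => decide (x = c))).length := by
          rw [htw]; simp at hlen ⊢; omega
        rw [List.take_of_length_le hlen']
      · have hc : ¬ (c = 'L' ∨ c = 'S' ∨ c = 'D') := by
          intro hc
          apply hlsd
          have hgl := uniform_getLast tlp c hall
          rcases hc with h1 | h1 | h1 <;> subst h1 <;> simp [hgl]
        rw [if_neg hc, if_neg hc]
    · simp only [List.isEmpty_iff]
      rw [if_neg hre]
      congr 1
      apply ih
      rcases h with hlen | hlsd
      · left
        show (List.drop (1 + (List.takeWhile (fun x => decide (x = c)) tlp).length) pw).length ≤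
          (List.drop (1 + (List.takeWhile (fun x => decide (x = c)) tlp).length) (c :: tlp)).length
        have h1 := (List.takeWhile_prefix (l := tlp) (fun x => decide (x = c))).length_le
        simp only [List.length_drop, List.length_cons]
        simp at hlen
        omega
      · right
        rwa [getLast_drop_of_ne_nil _ _ hre]

lemma runsGo_ne_runsGoB : ∀ (pw pat : List Char),
    pat ≠ [] → pat.length < pw.length →
    (pat.getLast? = some 'L' ∨ pat.getLast? = some 'S' ∨ pat.getLast? = some 'D') →
    runsGo pw pat ≠ runsGoB pw pat := by
  intro pw pat
  induction pw, pat using runsGo.induct with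
  | case1 pw => intro h; exact absurd rfl h
  | case2 pw c tlp L rest2 ih =>
    intro _ hlen hlsd
    rw [runsGo, runsGoB]
    by_cases hre : List.drop (1 + (List.takeWhile (fun x => decide (x = c)) tlp).length) (c :: tlp) = []
    · obtain ⟨htw, hall⟩ := run_all_eq c tlp hre
      have hgl := uniform_getLast tlp c hall
      have hc : c = 'L' ∨ c = 'S' ∨ c = 'D' := by
        rw [hgl] at hlsd
        rcases hlsd with h1 | h1 | h1
        · exact Or.inl (Option.some.inj h1)
        · exact Or.inr (Or.inl (Option.some.inj h1))
        · exact Or.inr (Or.inr (Option.some.inj h1))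
      simp only [List.isEmpty_iff]
      rw [if_pos hre, hre, runsGo_nil, runsGoB_nil, if_pos hc, if_pos hc]
      intro heq
      simp only [List.append_nil, List.cons.injEq] at heq
      have hl := congrArg (fun s : String => s.toList.length) heq.1
      simp only [String.toList_ofList, List.length_cons, List.length_append] at hl
      have hlenpw : tlp.length + 1 < pw.length := by simpa using hlen
      have htake : (pw.take (1 + (tlp.takeWhile (fun x => decide (x = c))).length)).length
          = 1 + (tlp.takeWhile (fun x => decide (x = c))).length := by
        rw [List.length_take, htw]
        omega
      rw [htake, htw] at hl
      omega
    · intro heq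
      simp only [List.isEmpty_iff] at heq
      rw [if_neg hre] at heq
      have htail := List.append_cancel_left heq
      apply ih ?_ ?_ ?_ htail
      · exact hre
      · show (List.drop (1 + (List.takeWhile (fun x => decide (x = c)) tlp).length) (c :: tlp)).length <
          (List.drop (1 + (List.takeWhile (fun x => decide (x = c)) tlp).length) pw).length
        have h1 := (List.takeWhile_prefix (l := tlp) (fun x => decide (x = c))).length_le
        simp only [List.length_drop, List.length_cons]
        simp at hlen
        omega
      · rwa [getLast_drop_of_ne_nil _ _ hre]

-- ===== VERDICT (by name: the statements are the Claim_ definitions above) =====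
theorem final_group_spec : Claim_unchanged_final_group := by
  intro password real_pattern _hdom hpre
  unfold Spec_final_group
  intro hnd
  rw [A_eq_runsGo password real_pattern hpre, B_eq_runsGoB]
  apply runsGo_eq_runsGoB
  unfold D_final_group at hnd
  by_cases hlsd : (real_pattern.toList.getLast? = some 'L' ∨ real_pattern.toList.getLast? = some 'S' ∨
      real_pattern.toList.getLast? = some 'D')
  · left
    by_contra hgt
    exact hnd ⟨hpre, by omega, hlsd⟩
  · right; exact hlsd

theorem final_group_changed : Claim_changed_final_group := by
  unfold Claim_changed_final_group
  refine ⟨by decide, by decide, by decide, by decide, by decide, by decide⟩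

theorem final_group_tight : Claim_exact_final_group := by
  intro password real_pattern _hdom hpre hd
  obtain ⟨hne, hlen, hlsd⟩ := hd
  rw [A_eq_runsGo password real_pattern hne, B_eq_runsGoB]
  exact runsGo_ne_runsGoB _ _ (toList_ne_nil _ hne) hlen hlsd
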